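-- pv_equiv track=rewrite | github.com/kenkov/nlp | langmodel/ngram.py | bothngram
-- ===== SOURCE A (Python) =====
-- import itertools
--
-- class NgramException(Exception):
--     pass
--
-- def bothngram(
--         seq: "sequence",
--         n: int,
--         keyword_len: int=1) -> "iterator":
--     """Return n-gram for both sides.
--
--     >>> both_ngram(["a", "b", "c", "d"], 1)
--     [('<s_0>', '<s_1>', 'a'),
--      ('<s_1>', 'a', 'b'),
--      ('a', 'b', 'c'),
--      ('b', 'c', 'd'),
--      ('c', 'd', '</s_1>'),
--      ('d', '</s_1>', '</s_0>')]
--     """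
--     seq = list(seq)
--     s_len = len(seq)
--     if s_len < keyword_len:
--         raise NgramException("the sentences length is not enough:\
--                              len(sentences)={} < n={}".format(s_len, n))
--     # start_symbol:
--     ss = []
--     for i in range(n):
--         ss.append("<s_{}>".format(i))
--     seq = ss + seq
--     # end_symbol:
--     es = []
--     for i in range(n-1, -1, -1):
--         es.append("</s_{}>".format(i))
--     seq = seq + es
--
--     xs = itertools.tee(seq, 2*n+keyword_len)
--     for i, t in enumerate(xs[1:]):
--         for _ in range(i+1):
--             next(t)
--     return zip(*xs)
-- ===== SOURCE B (Python) =====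
-- class NgramException(Exception):
--     pass
--
-- def bothngram(
--         seq: "sequence",
--         n: int,
--         keyword_len: int=1) -> "iterator":
--     """Return n-gram for both sides, by direct slicing over the padded list."""
--     seq = list(seq)
--     s_len = len(seq)
--     if s_len < keyword_len:
--         raise NgramException("the sentences length is not enough:\
--                              len(sentences)={} < n={}".format(s_len, n))
--     padded = (["<s_{}>".format(i) for i in range(n)]
--               + seq
--               + ["</s_{}>".format(i) for i in range(n - 1, -1, -1)])
--     w = 2 * n + keyword_len
--     return (tuple(padded[i:i + w]) for i in range(len(padded) - w + 1))
-- ===== Notes on version B (the rewrite author's own statement) =====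
-- stated objective: idiomatic
-- what changed: Replaces the itertools.tee of 2n+keyword_len staggered iterators zipped together with a single generator expression that slices each window padded[i:i+w] directly out of the padded list by index.
-- outside the precondition, e.g. on bothngram([], 0, 0): A returns [], B returns [()]; on bothngram(['a', 'b'], 0, 0): A returns [], B returns [(), (), ()]
import Mathlib
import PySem

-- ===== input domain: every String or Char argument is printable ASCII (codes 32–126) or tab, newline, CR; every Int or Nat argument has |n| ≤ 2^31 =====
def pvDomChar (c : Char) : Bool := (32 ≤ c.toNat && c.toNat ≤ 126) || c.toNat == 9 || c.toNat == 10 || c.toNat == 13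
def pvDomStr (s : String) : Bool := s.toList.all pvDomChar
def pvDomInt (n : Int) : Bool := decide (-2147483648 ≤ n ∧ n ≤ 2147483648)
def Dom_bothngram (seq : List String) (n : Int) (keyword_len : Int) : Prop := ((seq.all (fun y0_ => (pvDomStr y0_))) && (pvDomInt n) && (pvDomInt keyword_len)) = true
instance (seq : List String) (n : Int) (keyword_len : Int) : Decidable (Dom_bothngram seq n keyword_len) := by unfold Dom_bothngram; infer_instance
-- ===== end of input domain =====

-- B replaces the tee/zip of 2n+keyword_len staggered iterators with direct index-based
-- slicing of each window out of the padded list (idiomatic; same padding, same windows).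

-- ===== PORT A =====
-- zip(*xs): emit the heads of all streams while every stream is nonempty (zip() of no streams is empty)
def pyZipStar (streams : List (List String)) : List (List String) :=
  if streams.isEmpty then []
  else if streams.all (fun s => !s.isEmpty) then
    streams.map (fun s => s.headD "") :: pyZipStar (streams.map List.tail)
  else []
termination_by (streams.headD []).length
decreasing_by
  cases streams with
  | nil => simp at *
  | cons x rest =>
    simp only [List.headD_cons]
    simp only [List.all_cons, Bool.and_eq_true, Bool.not_eq_true'] at *
    cases x with
    | nil => simp at *
    | cons y ys => simp

def bothngram (seq : List String) (n : Int) (keyword_len : Int) : List (List String) :=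
  let s_len : Int := seq.length
  if s_len < keyword_len then []  -- Python raises NgramException here (outside Pre_)
  else
    let ss := (PySem.List.pyRange 0 n 1).foldl
      (fun acc i => acc ++ ["<s_" ++ PySem.Int.toStr i ++ ">"]) []
    let seq1 := ss ++ seq
    let es := (PySem.List.pyRange (n - 1) (-1) (-1)).foldl
      (fun acc i => acc ++ ["</s_" ++ PySem.Int.toStr i ++ ">"]) []
    let seq2 := seq1 ++ es
    let w := 2 * n + keyword_len
    if w < 0 then []  -- itertools.tee(seq, w) raises ValueError for w < 0 (outside Pre_)
    else
      -- tee w copies; copy i is advanced i times, then zip them all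
      pyZipStar ((PySem.List.pyRange 0 w 1).map (fun i => seq2.drop i.toNat))

-- ===== PORT B =====
def bothngram_alt (seq : List String) (n : Int) (keyword_len : Int) : List (List String) :=
  let s_len : Int := seq.length
  if s_len < keyword_len then []  -- Python raises NgramException here (outside Pre_)
  else
    let padded := ((PySem.List.pyRange 0 n 1).map (fun i => "<s_" ++ PySem.Int.toStr i ++ ">"))
      ++ seq
      ++ ((PySem.List.pyRange (n - 1) (-1) (-1)).map (fun i => "</s_" ++ PySem.Int.toStr i ++ ">"))
    let w := 2 * n + keyword_len
    (PySem.List.pyRange 0 ((padded.length : Int) - w + 1) 1).map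
      (fun i => PySem.List.slice padded (some i) (some (i + w)))

-- ===== PRECONDITION & SPEC =====
-- Pre_ excludes the inputs where A raises (keyword_len > len(seq): NgramException; 2n+keyword_len < 0:
-- tee's ValueError) and the degenerate window width 2n+keyword_len = 0, where A's empty zip() and B's
-- list of empty windows are both accidental values for a nonsensical request.
def Pre_bothngram (seq : List String) (n : Int) (keyword_len : Int) : Prop :=
  keyword_len ≤ (seq.length : Int) ∧ 1 ≤ 2 * n + keyword_len
instance (seq : List String) (n : Int) (keyword_len : Int) : Decidable (Pre_bothngram seq n keyword_len) := by unfold Pre_bothngram; infer_instance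
def pvWitness_bothngram : List String × Int × Int := (["a", "b", "c"], 1, 1)

def Spec_bothngram (seq : List String) (n : Int) (keyword_len : Int) (out : List (List String)) : Prop := out = bothngram_alt seq n keyword_len
instance (seq : List String) (n : Int) (keyword_len : Int) (out : List (List String)) : Decidable (Spec_bothngram seq n keyword_len out) := by unfold Spec_bothngram; infer_instance

-- ===== CLAIM (what is proved, stated in full; the proofs are below) =====
def Claim_equal_bothngram : Prop := ∀ (seq : List String) (n : Int) (keyword_len : Int), Dom_bothngram seq n keyword_len → Pre_bothngram seq n keyword_len → Spec_bothngram seq n keyword_len (bothngram seq n keyword_len)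

-- ===== LEMMAS AND PROOFS =====

-- heads of the W staggered suffixes = the first W elements
lemma heads_of_drops (xs : List String) (W : Nat) (h : W ≤ xs.length) :
    (List.range W).map (fun k => (xs.drop k).headD "") = xs.take W := by
  induction xs generalizing W with
  | nil =>
    have hW0 : W = 0 := by simpa using h
    subst hW0; simp
  | cons x rest ih =>
    cases W with
    | zero => simp
    | succ W' =>
      rw [List.range_succ_eq_map]
      simp only [List.map_cons, List.map_map, List.drop_zero, List.headD_cons, List.take_succ_cons]
      have := ih W' (by simpa using h)
      simpa [Function.comp] using this

-- zipping the W staggered suffixes yields the sliding windows of width W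
lemma zip_drops_eq_windows (xs : List String) (W : Nat) (hW : 1 ≤ W) :
    pyZipStar ((List.range W).map (fun k => xs.drop k)) =
      (List.range (xs.length + 1 - W)).map (fun k => (xs.drop k).take W) := by
  induction xs with
  | nil =>
    rw [pyZipStar]
    have hne : ¬ ((List.range W).map (fun k => ([] : List String).drop k)).isEmpty = true := by
      simp; omega
    rw [if_neg hne, if_neg ?_]
    · have : 1 - W = 0 := by omega
      simp [this]
    · simp only [List.all_map, List.all_eq_true]
      intro h
      have := h 0 (by simp; omega)
      simp at this
  | cons x rest ih =>
    by_cases hlen : W ≤ (x :: rest).length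
    · rw [pyZipStar]
      have hne : ¬ ((List.range W).map (fun k => (x :: rest).drop k)).isEmpty = true := by
        simp; omega
      rw [if_neg hne, if_pos ?_]
      · have htails : ((List.range W).map (fun k => (x :: rest).drop k)).map List.tail
            = (List.range W).map (fun k => rest.drop k) := by
          simp only [List.map_map]
          refine List.map_congr_left ?_
          intro k hk
          simp [List.tail_drop]
        rw [List.map_map]
        simp only [Function.comp_def]
        rw [heads_of_drops (x :: rest) W hlen, htails, ih]
        have hsub : (x :: rest).length + 1 - W = (rest.length + 1 - W) + 1 := by
          simp only [List.length_cons] at hlen ⊢; omega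
        rw [hsub, List.range_succ_eq_map]
        simp only [List.map_cons, List.map_map, List.drop_zero]
        congr 1
      · simp only [List.all_map, List.all_eq_true]
        intro k hk
        simp only [List.mem_range] at hk
        simp only [List.length_cons] at hlen
        simp [List.isEmpty_eq_false_iff, List.drop_eq_nil_iff]
        omega
    · rw [pyZipStar]
      have hne : ¬ ((List.range W).map (fun k => (x :: rest).drop k)).isEmpty = true := by
        simp; omega
      rw [if_neg hne, if_neg ?_]
      · simp only [List.length_cons] at hlen ⊢
        have h0 : rest.length + 1 + 1 - W = 0 := by omega
        rw [h0]; simp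
      · simp only [List.all_map, List.all_eq_true]
        simp only [List.length_cons] at hlen
        intro h
        have := h (W - 1) (by simp; omega)
        simp [List.isEmpty_eq_false_iff, List.drop_eq_nil_iff] at this
        omega

-- the loop appending formatted symbols builds exactly the mapped list
lemma foldl_fmt (l : List Int) (f : Int → String) :
    l.foldl (fun acc i => acc ++ [f i]) [] = l.map f :=
  by simpa using PySem.List.foldl_append_singleton_eq_map (l := l) (f := f) (acc := [])

-- ===== VERDICT (by name: the statement is the Claim_ definition above) =====
theorem bothngram_spec : Claim_equal_bothngram := by
  intro seq n k _ hpre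
  obtain ⟨hk, hw⟩ := hpre
  unfold Spec_bothngram bothngram bothngram_alt
  simp only
  rw [if_neg (by omega), if_neg (by omega), if_neg (by omega)]
  rw [foldl_fmt, foldl_fmt]
  set padded := ((PySem.List.pyRange 0 n 1).map (fun i => "<s_" ++ PySem.Int.toStr i ++ ">"))
      ++ seq
      ++ ((PySem.List.pyRange (n - 1) (-1) (-1)).map (fun i => "</s_" ++ PySem.Int.toStr i ++ ">")) with hpadded
  set w : Int := 2 * n + k with hwdef
  -- switch both ranges to Nat form
  have hw0 : (0 : Int) ≤ w := by omega
  set W : Nat := w.toNat with hWdef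
  have hwW : w = (W : Int) := by omega
  rw [hwW, PySem.List.pyRange_one, PySem.List.pyRange_one]
  simp only [Int.sub_zero, Int.toNat_natCast, zero_add, List.map_map]
  have h1 : ((W : Int) : Int).toNat = W := by omega
  have h2 : (((padded.length : Int) - (W : Int) + 1)).toNat = padded.length + 1 - W := by omega
  rw [h2]
  have hW1 : 1 ≤ W := by omega
  have := zip_drops_eq_windows padded W hW1
  have hl : (List.range W).map ((fun i => padded.drop i.toNat) ∘ (fun k : Nat => (k : Int)))
      = (List.range W).map (fun k => padded.drop k) := by
    refine List.map_congr_left ?_; intro a _; simp [Function.comp]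
  rw [hl, this]
  refine List.map_congr_left ?_
  intro a _
  simp only [Function.comp]
  rw [← hwW]
  have : PySem.List.slice padded (some (a : Int)) (some ((a : Int) + w))
      = (padded.drop a).take W := by
    rw [hwW]
    exact PySem.List.slice_natCast_add padded a W
  rw [this]
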